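-- pv_equiv track=rewrite | github.com/H604827/ControlActions | .skills/shared/tag_utils.py | strings_similar
-- ===== SOURCE A (Python) =====
-- def strings_similar(s1: str, s2: str) -> bool:
--     """
--     Check if two tag names are similar (handles naming variations).
--
--     Rules:
--     - First 3 characters must match exactly
--     - Characters after underscore must match exactly OR have a 4+ char common substring
--
--     Examples:
--         strings_similar('03LIC_1071', '03LIC_1071') -> True
--         strings_similar('03LCV_1071', '03LIC_1071') -> True (1071 matches)
--         strings_similar('03PICA_1013', '03PIC_1013') -> True (1013 matches)
--         strings_similar('03LIC_1071', '04LIC_1071') -> False (first 3 don't match)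
--     """
--     s1 = str(s1).strip().replace(' ', '').upper()
--     s2 = str(s2).strip().replace(' ', '').upper()
--
--     # First 3 characters must match exactly
--     if len(s1) < 3 or len(s2) < 3:
--         return False
--     if s1[:3] != s2[:3]:
--         return False
--
--     # Must have underscore
--     if '_' not in s1 or '_' not in s2:
--         return False
--
--     s1_after = s1.split('_', 1)[1]
--     s2_after = s2.split('_', 1)[1]
--
--     # Check if exactly the same after underscore
--     if s1_after == s2_after:
--         return True
--
--     # Check for common substring of at least 4 characters
--     shorter = s1_after if len(s1_after) <= len(s2_after) else s2_after
--     longer = s2_after if len(s1_after) <= len(s2_after) else s1_after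
--
--     for i in range(len(shorter) - 3):
--         substring = shorter[i:i+4]
--         if substring in longer:
--             return True
--
--     return False
-- ===== SOURCE B (Python) =====
-- def strings_similar(s1: str, s2: str) -> bool:
--     s1 = str(s1).strip().replace(' ', '').upper()
--     s2 = str(s2).strip().replace(' ', '').upper()
--     if len(s1) < 3 or len(s2) < 3:
--         return False
--     if s1[:3] != s2[:3]:
--         return False
--     if '_' not in s1 or '_' not in s2:
--         return False
--     a1 = s1.split('_', 1)[1]
--     a2 = s2.split('_', 1)[1]
--     if a1 == a2:
--         return True
--     # symmetric 4-gram indexes: a common 4+ char substring exists iff a common 4-gram exists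
--     g1 = {a1[i:i + 4] for i in range(len(a1) - 3)}
--     g2 = {a2[i:i + 4] for i in range(len(a2) - 3)}
--     return bool(g1 & g2)
-- ===== Notes on version B (the rewrite author's own statement) =====
-- stated objective: alternative
-- what changed: The shorter/longer sliding-window scan that re-searches one suffix inside the other is replaced by building the two sets of 4-grams and testing their intersection for emptiness.
import Mathlib
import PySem

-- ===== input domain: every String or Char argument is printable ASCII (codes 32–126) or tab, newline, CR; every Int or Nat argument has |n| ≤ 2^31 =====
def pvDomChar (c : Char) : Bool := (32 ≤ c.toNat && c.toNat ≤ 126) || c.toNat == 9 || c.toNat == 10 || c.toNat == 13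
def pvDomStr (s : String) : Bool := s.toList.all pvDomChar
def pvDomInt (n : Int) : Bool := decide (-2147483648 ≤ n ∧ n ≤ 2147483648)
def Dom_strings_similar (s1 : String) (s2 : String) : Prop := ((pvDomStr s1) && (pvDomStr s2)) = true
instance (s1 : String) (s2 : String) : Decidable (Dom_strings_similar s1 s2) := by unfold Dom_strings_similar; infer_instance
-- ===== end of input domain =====

-- B replaces A's shorter/longer sliding-window substring scan by a symmetric intersection of the two 4-gram sets (alternative decomposition, same guards).

-- ===== PORT A =====
-- shared normalization: str(s).strip().replace(' ', '').upper()
def ssNorm (s : String) : List Char :=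
  PySem.Chars.upper (PySem.Chars.replace (PySem.Chars.strip s.toList) [' '] [])

def strings_similar (s1 : String) (s2 : String) : Bool :=
  let t1 := ssNorm s1
  let t2 := ssNorm s2
  if t1.length < 3 ∨ t2.length < 3 then false
  else if PySem.Chars.slice t1 none (some 3) ≠ PySem.Chars.slice t2 none (some 3) then false
  else if ¬ PySem.Chars.isIn ['_'] t1 ∨ ¬ PySem.Chars.isIn ['_'] t2 then false
  else
    -- s.split('_', 1)[1]; the [1] cannot raise because the '_'-membership guard held
    let a1 := (PySem.Chars.splitOnMax t1 ['_'] 1).getD 1 []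
    let a2 := (PySem.Chars.splitOnMax t2 ['_'] 1).getD 1 []
    if a1 = a2 then true
    else
      let shorter := if a1.length ≤ a2.length then a1 else a2
      let longer := if a1.length ≤ a2.length then a2 else a1
      -- for i in range(len(shorter) - 3): if shorter[i:i+4] in longer: return True
      (List.range (shorter.length - 3)).any fun i =>
        PySem.Chars.isIn (PySem.Chars.slice shorter (some (i : Int)) (some ((i : Int) + 4))) longer

-- ===== PORT B =====
-- {t[i:i+4] for i in range(len(t) - 3)}
def ssGrams (t : List Char) : PySem.Set (List Char) :=
  PySem.Set.ofList ((List.range (t.length - 3)).map fun i =>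
    PySem.Chars.slice t (some (i : Int)) (some ((i : Int) + 4)))

def strings_similar_alt (s1 : String) (s2 : String) : Bool :=
  let t1 := ssNorm s1
  let t2 := ssNorm s2
  if t1.length < 3 ∨ t2.length < 3 then false
  else if PySem.Chars.slice t1 none (some 3) ≠ PySem.Chars.slice t2 none (some 3) then false
  else if ¬ PySem.Chars.isIn ['_'] t1 ∨ ¬ PySem.Chars.isIn ['_'] t2 then false
  else
    let a1 := (PySem.Chars.splitOnMax t1 ['_'] 1).getD 1 []
    let a2 := (PySem.Chars.splitOnMax t2 ['_'] 1).getD 1 []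
    if a1 = a2 then true
    else !(PySem.Set.inter (ssGrams a1) (ssGrams a2)).isEmpty

-- ===== PRECONDITION & SPEC =====
def Spec_strings_similar (s1 : String) (s2 : String) (out : Bool) : Prop := out = strings_similar_alt s1 s2
instance (s1 : String) (s2 : String) (out : Bool) : Decidable (Spec_strings_similar s1 s2 out) := by unfold Spec_strings_similar; infer_instance

-- ===== CLAIM (what is proved, stated in full; the proofs are below) =====
def Claim_equal_strings_similar : Prop := ∀ (s1 : String) (s2 : String), Dom_strings_similar s1 s2 → Spec_strings_similar s1 s2 (strings_similar s1 s2)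

-- ===== LEMMAS AND PROOFS =====

-- the slice t[i:i+4] is (drop i).take 4
lemma ss_slice4 (t : List Char) (i : Nat) :
    PySem.List.slice t (some (i : Int)) (some ((i : Int) + 4)) = (t.drop i).take 4 := by
  have h := PySem.List.slice_natCast_add t i 4
  simpa using h

lemma ss_gram_len {t : List Char} {i : Nat} (h : i < t.length - 3) :
    ((t.drop i).take 4).length = 4 := by
  simp only [List.length_take, List.length_drop]
  omega

-- a length-4 list is an infix of t iff it is one of t's 4-grams
lemma ss_infix_iff (t g : List Char) (hg : g.length = 4) :
    g <:+: t ↔ ∃ i, i < t.length - 3 ∧ (t.drop i).take 4 = g := by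
  constructor
  · rintro ⟨pre, suf, rfl⟩
    refine ⟨pre.length, ?_, ?_⟩
    · simp only [List.length_append]
      omega
    · have h1 : (pre ++ g ++ suf).drop pre.length = g ++ suf := by
        rw [List.append_assoc]; simp
      rw [h1, List.take_left' hg]
  · rintro ⟨i, hi, rfl⟩
    exact ((List.take_prefix 4 (t.drop i)).isInfix).trans ((List.drop_suffix i t).isInfix)

lemma ss_mem_grams (t g : List Char) :
    g ∈ ssGrams t ↔ ∃ i, i < t.length - 3 ∧ (t.drop i).take 4 = g := by
  simp [ssGrams, PySem.Set.mem_ofList, List.mem_map, List.mem_range, ss_slice4, PySem.Chars.slice_eq_listSlice]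

-- the sliding-window loop over (a, b) decides "some common 4-gram exists"
lemma ss_any_iff (a b : List Char) :
    ((List.range (a.length - 3)).any fun i =>
        PySem.Chars.isIn (PySem.Chars.slice a (some (i : Int)) (some ((i : Int) + 4))) b) = true
      ↔ ∃ g, g ∈ ssGrams a ∧ g ∈ ssGrams b := by
  simp only [List.any_eq_true, List.mem_range, PySem.Chars.slice_eq_listSlice, ss_slice4,
    PySem.Chars.isIn_iff_infix]
  constructor
  · rintro ⟨i, hi, hin⟩
    refine ⟨(a.drop i).take 4, (ss_mem_grams a _).2 ⟨i, hi, rfl⟩, (ss_mem_grams b _).2 ?_⟩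
    exact (ss_infix_iff b _ (ss_gram_len hi)).1 hin
  · rintro ⟨g, hga, hgb⟩
    obtain ⟨i, hi, rfl⟩ := (ss_mem_grams a g).1 hga
    obtain ⟨j, hj, hq⟩ := (ss_mem_grams b _).1 hgb
    exact ⟨i, hi, (ss_infix_iff b _ (ss_gram_len hi)).2 ⟨j, hj, hq⟩⟩

lemma ss_inter_iff (a b : List Char) :
    (!(PySem.Set.inter (ssGrams a) (ssGrams b)).isEmpty) = true
      ↔ ∃ g, g ∈ ssGrams a ∧ g ∈ ssGrams b := by
  simp [PySem.Set.inter, PySem.Set.contains, List.filter_eq_nil_iff]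

lemma ss_tail_eq (a b : List Char) :
    ((List.range (a.length - 3)).any fun i =>
        PySem.Chars.isIn (PySem.Chars.slice a (some (i : Int)) (some ((i : Int) + 4))) b)
      = !(PySem.Set.inter (ssGrams a) (ssGrams b)).isEmpty := by
  rw [Bool.eq_iff_iff, ss_any_iff, ss_inter_iff]

-- the scan's shorter/longer orientation does not matter: a common 4-gram is symmetric
lemma ss_tail_eq' (a b : List Char) :
    ((List.range (b.length - 3)).any fun i =>
        PySem.Chars.isIn (PySem.Chars.slice b (some (i : Int)) (some ((i : Int) + 4))) a)
      = !(PySem.Set.inter (ssGrams a) (ssGrams b)).isEmpty := by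
  rw [Bool.eq_iff_iff, ss_any_iff, ss_inter_iff]
  tauto

-- ===== VERDICT (by name: the statement is the Claim_ definition above) =====
theorem strings_similar_spec : Claim_equal_strings_similar := by
  intro s1 s2 _
  unfold Spec_strings_similar strings_similar strings_similar_alt
  dsimp only
  split_ifs
  · rfl
  · rfl
  · rfl
  · rfl
  · exact ss_tail_eq _ _
  · exact ss_tail_eq' _ _
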